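-- pv_equiv track=rewrite | github.com/warramma/solutions---tip102 | unit 4/session.py | validate_nft_actions
-- ===== SOURCE A (Python) =====
-- def validate_nft_actions(actions):
--     stack = []
--
--     for action in actions:
--         if not stack:
--             stack.append(action)
--         else:
--             if action == 'remove' and stack[-1] == "add":
--                 stack.pop()
--             else:
--                 stack.append(action)
--     return len(stack) == 0
-- ===== SOURCE B (Python) =====
-- def validate_nft_actions(actions):
--     count = 0
--     for action in actions:
--         if action == 'add':
--             count += 1
--         elif action == 'remove' and count > 0:
--             count -= 1
--         else:
--             return False
--     return count == 0
-- ===== Notes on version B (the rewrite author's own statement) =====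
-- stated objective: simpler
-- what changed: Replaces the list stack with an integer counter of outstanding 'add' tokens and an early False return on any token the stack could never cancel (an unmatched 'remove' or a foreign token), instead of leaving it stuck on the stack until the final length check.
import Mathlib
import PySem

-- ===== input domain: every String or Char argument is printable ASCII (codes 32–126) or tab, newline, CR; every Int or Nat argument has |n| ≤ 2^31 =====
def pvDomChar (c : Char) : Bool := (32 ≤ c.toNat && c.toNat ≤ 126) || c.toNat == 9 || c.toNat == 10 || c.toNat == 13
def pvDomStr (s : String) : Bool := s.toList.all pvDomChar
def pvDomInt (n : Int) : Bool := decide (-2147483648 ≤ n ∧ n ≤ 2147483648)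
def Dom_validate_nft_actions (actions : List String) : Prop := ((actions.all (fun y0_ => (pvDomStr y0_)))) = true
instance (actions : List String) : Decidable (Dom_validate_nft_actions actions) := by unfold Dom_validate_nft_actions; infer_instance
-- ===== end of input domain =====

-- B replaces A's list stack with a counter of outstanding "add" tokens plus an early False
-- return on any token the stack could never cancel; objective: simpler.


-- ===== PORT A =====
-- step function of A's loop body on the stack (Python list, appended/popped at the end)
def nftStep (stack : List String) (action : String) : List String :=
  if stack.isEmpty then stack ++ [action]
  else if action == "remove" && stack.getLast! == "add" then stack.dropLast
  else stack ++ [action]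

def validate_nft_actions (actions : List String) : Bool :=
  (actions.foldl nftStep []).length == 0

-- ===== PORT B =====
def nftGo : List String → Nat → Bool
  | [], count => count == 0
  | action :: rest, count =>
    if action == "add" then nftGo rest (count + 1)
    else if action == "remove" && decide (count > 0) then nftGo rest (count - 1)
    else false

def validate_nft_actions_alt (actions : List String) : Bool := nftGo actions 0

-- ===== PRECONDITION & SPEC =====
def Spec_validate_nft_actions (actions : List String) (out : Bool) : Prop := out = validate_nft_actions_alt actions
instance (actions : List String) (out : Bool) : Decidable (Spec_validate_nft_actions actions out) := by unfold Spec_validate_nft_actions; infer_instance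

-- ===== CLAIM (what is proved, stated in full; the proofs are below) =====
def Claim_equal_validate_nft_actions : Prop := ∀ (actions : List String), Dom_validate_nft_actions actions → Spec_validate_nft_actions actions (validate_nft_actions actions)

-- ===== LEMMAS AND PROOFS =====

-- once a non-"add" element is on the stack it can never be popped, so the stack never empties
lemma nft_stuck (rest : List String) :
    ∀ stack : List String, (∃ x ∈ stack, x ≠ "add") →
      (rest.foldl nftStep stack).length ≠ 0 := by
  induction rest with
  | nil =>
    intro stack ⟨x, hx, _⟩
    simp [List.foldl]
    exact List.ne_nil_of_mem hx
  | cons a r ih =>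
    intro stack h
    obtain ⟨x, hx, hxne⟩ := h
    simp only [List.foldl]
    apply ih
    unfold nftStep
    have hne : stack ≠ [] := List.ne_nil_of_mem hx
    simp [List.isEmpty_eq_false_iff.mpr hne]
    split_ifs with hpop
    · -- pop: last is "add", so x ≠ last, hence x survives in dropLast
      have hlast : stack.getLast?.getD "" = "add" := by
        simp at hpop; exact hpop.2
      refine ⟨x, ?_, hxne⟩
      have : stack = stack.dropLast ++ [stack.getLast hne] := (List.dropLast_append_getLast hne).symm
      rw [this] at hx
      rcases List.mem_append.mp hx with h1 | h2
      · exact h1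
      · exfalso
        have : x = stack.getLast hne := by simpa using h2
        rw [List.getLast?_eq_getLast_of_ne_nil hne] at hlast
        simp at hlast
        exact hxne (this.trans hlast)
    · exact ⟨x, List.mem_append_left _ hx, hxne⟩

-- main invariant: A's fold from a pure-"add" stack of height n matches B's counter loop at n
lemma nft_inv (rest : List String) :
    ∀ n : Nat, ((rest.foldl nftStep (List.replicate n "add")).length == 0) = nftGo rest n := by
  induction rest with
  | nil =>
    intro n
    simp [nftGo]
  | cons a r ih =>
    intro n
    simp only [List.foldl, nftGo]
    by_cases hadd : a = "add"
    · subst hadd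
      have hstep : nftStep (List.replicate n "add") "add" = List.replicate (n + 1) "add" := by
        unfold nftStep
        rcases Nat.eq_zero_or_pos n with h0 | hpos
        · subst h0; simp
        · have hne : (List.replicate n "add") ≠ ([] : List String) := by
            simp; omega
          simp [List.isEmpty_eq_false_iff.mpr hne, List.replicate_succ']
      rw [hstep]
      simp [ih (n + 1)]
    · by_cases hrem : a = "remove"
      · subst hrem
        rcases Nat.eq_zero_or_pos n with h0 | hpos
        · subst h0
          have hstep : nftStep (List.replicate 0 "add") "remove" = ["remove"] := by
            unfold nftStep; simp
          rw [hstep]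
          have := nft_stuck r ["remove"] ⟨"remove", by simp, by simp⟩
          simp at this ⊢
          exact this
        · have hne : (List.replicate n "add") ≠ ([] : List String) := by
            simp; omega
          have hstep : nftStep (List.replicate n "add") "remove" = List.replicate (n - 1) "add" := by
            unfold nftStep
            have hlast : (List.replicate n "add").getLast? = some "add" := by
              rw [List.getLast?_eq_getLast_of_ne_nil hne]
              simp
            simp [List.isEmpty_eq_false_iff.mpr hne, hlast]
          rw [hstep]
          simp [hpos, ih (n - 1)]
      · -- foreign token: it gets pushed and sticks
        have hstep : nftStep (List.replicate n "add") a = List.replicate n "add" ++ [a] := by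
          unfold nftStep
          rcases Nat.eq_zero_or_pos n with h0 | hpos
          · subst h0; simp
          · have hne : (List.replicate n "add") ≠ ([] : List String) := by
              simp; omega
            simp [List.isEmpty_eq_false_iff.mpr hne, hrem]
        rw [hstep]
        have := nft_stuck r (List.replicate n "add" ++ [a]) ⟨a, by simp, hadd⟩
        simp [hadd, hrem, this]

-- ===== VERDICT (by name: the statement is the Claim_ definition above) =====
theorem validate_nft_actions_spec : Claim_equal_validate_nft_actions := by
  intro actions _
  unfold Spec_validate_nft_actions validate_nft_actions validate_nft_actions_alt
  have := nft_inv actions 0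
  simpa using this
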